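-- pv_equiv track=rewrite | github.com/kuschanow/j-perm | src/j_perm/handlers/template.py | _has_unescaped_placeholder
-- ===== SOURCE A (Python) =====
-- def _has_unescaped_placeholder(s: str) -> bool:
--     """Return True if *s* contains at least one ``${…}`` that is **not**
--     preceded by a ``$`` escape character.
--     """
--     i = 0
--     while True:
--         j = s.find("${", i)
--         if j == -1:
--             return False
--         if j > 0 and s[j - 1] == "$":
--             i = j + 2
--             continue
--         return True
-- ===== SOURCE B (Python) =====
-- import re
--
-- _UNESCAPED_PLACEHOLDER_RE = re.compile(r'(?<!\$)\$\{')
--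
--
-- def _has_unescaped_placeholder(s: str) -> bool:
--     """Return True if *s* contains at least one ``${`` that is not
--     preceded by a ``$`` escape character."""
--     return _UNESCAPED_PLACEHOLDER_RE.search(s) is not None
-- ===== Notes on version B (the rewrite author's own statement) =====
-- stated objective: idiomatic
-- what changed: Replaces the manual find/advance while-loop with its index bookkeeping and skip logic by a single precompiled regular expression with a negative lookbehind ((?<!\$)\$\{) that matches exactly the unescaped placeholders.
import Mathlib
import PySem

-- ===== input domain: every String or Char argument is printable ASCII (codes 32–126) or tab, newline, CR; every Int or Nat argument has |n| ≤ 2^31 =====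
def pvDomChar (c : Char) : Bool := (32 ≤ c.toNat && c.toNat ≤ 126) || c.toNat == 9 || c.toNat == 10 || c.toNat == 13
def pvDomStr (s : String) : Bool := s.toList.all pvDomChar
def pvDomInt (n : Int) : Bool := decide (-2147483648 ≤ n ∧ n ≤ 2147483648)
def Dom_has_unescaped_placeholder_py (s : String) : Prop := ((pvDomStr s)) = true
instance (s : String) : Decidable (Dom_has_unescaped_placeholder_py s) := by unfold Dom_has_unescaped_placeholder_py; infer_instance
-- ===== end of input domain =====

-- B replaces A's manual find/advance scan by a single "match at some position, not preceded by '$'" search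
-- (a compiled regex with negative lookbehind in Python); objective: idiomatic.

-- ===== PORT A =====
-- helper lemma cited by pvLoopA's termination proof: a start index past the end finds nothing
theorem pvFindFrom_gt_len (cs sub : List Char) (i : Nat) (h : cs.length < i) :
    PySem.Chars.findFrom cs sub (i : Int) none = -1 := by
  unfold PySem.Chars.findFrom
  simp only []
  have hlt : (cs.length : Int) < (i : Int) := by exact_mod_cast h
  split_ifs <;> omega


-- the while-loop of A: find "${" from i; if absent return False; if escaped skip to j+2; else return True
def pvLoopA (cs : List Char) (i : Nat) : Bool :=
  let j := PySem.Chars.findFrom cs ['$', '{'] (i : Int) none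
  if hj : j = -1 then false
  else if 0 < j ∧ PySem.List.pyGet? cs (j - 1) = some '$' then
    pvLoopA cs (j.toNat + 2)
  else true
termination_by cs.length + 1 - i
decreasing_by
  have hle : i ≤ cs.length := by
    by_contra hc
    exact hj (pvFindFrom_gt_len cs _ i (by omega))
  have hsp := PySem.Chars.findFrom_natCast_spec cs ['$', '{'] i hle hj
  omega

def has_unescaped_placeholder_py (s : String) : Bool := pvLoopA s.toList 0


-- ===== PORT B =====
-- port of B's regex search r'(?<!\$)\$\{': some position i matches "${" and is not preceded by '$'
def has_unescaped_placeholder_py_alt (s : String) : Bool :=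
  let cs := s.toList
  (List.range cs.length).any fun i =>
    cs[i]? == some '$' && cs[i + 1]? == some '{' &&
      !(decide (0 < i) && cs[i - 1]? == some '$')

-- ===== PRECONDITION & SPEC =====
def Spec_has_unescaped_placeholder_py (s : String) (out : Bool) : Prop := out = has_unescaped_placeholder_py_alt s
instance (s : String) (out : Bool) : Decidable (Spec_has_unescaped_placeholder_py s out) := by unfold Spec_has_unescaped_placeholder_py; infer_instance

-- ===== CLAIM (what is proved, stated in full; the proofs are below) =====
def Claim_equal_has_unescaped_placeholder_py : Prop := ∀ (s : String), Dom_has_unescaped_placeholder_py s → Spec_has_unescaped_placeholder_py s (has_unescaped_placeholder_py s)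

-- ===== LEMMAS AND PROOFS =====
theorem pvPairPrefix (l : List Char) : (['$','{'] <+: l) ↔ l[0]? = some '$' ∧ l[1]? = some '{' := by
  constructor
  · rintro ⟨t, rfl⟩; simp
  · rintro ⟨h1, h2⟩
    match l, h1, h2 with
    | a :: b :: t, h1, h2 => simp_all

theorem pvMatchAt (cs : List Char) (k : Nat) :
    (['$','{'] <+: cs.drop k) ↔ cs[k]? = some '$' ∧ cs[k+1]? = some '{' := by
  rw [pvPairPrefix]
  simp [List.getElem?_drop]

theorem pvLoopA_iff (cs : List Char) (i : Nat) :
    pvLoopA cs i = true ↔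
      ∃ k, i ≤ k ∧ (cs[k]? = some '$' ∧ cs[k+1]? = some '{') ∧
        (k = 0 ∨ cs[k-1]? ≠ some '$') := by
  induction i using pvLoopA.induct cs with
  | case1 i j hj =>
    have hj' : PySem.Chars.findFrom cs ['$','{'] (i : Int) none = -1 := hj
    rw [pvLoopA, dif_pos hj']
    constructor
    · intro h; exact absurd h (by simp)
    · rintro ⟨k, hik, ⟨h1, h2⟩, -⟩
      exfalso
      obtain ⟨hk, -⟩ := List.getElem?_eq_some_iff.mp h1
      have hle : i ≤ cs.length := by
        by_contra hc
        omega
      have hno := (PySem.Chars.findFrom_natCast_eq_neg_one_iff cs ['$','{'] i hle).mp hj'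
      apply hno
      have hpre : ['$','{'] <+: cs.drop k := (pvMatchAt cs k).mpr ⟨h1, h2⟩
      have : cs.drop k = (cs.drop i).drop (k - i) := by
        rw [List.drop_drop]; congr 1; omega
      rw [this] at hpre
      exact hpre.isInfix.trans (List.drop_suffix _ _).isInfix
  | case2 i j hj hcond ih =>
    have hj' : ¬ PySem.Chars.findFrom cs ['$','{'] (i : Int) none = -1 := hj
    have hcond' : 0 < PySem.Chars.findFrom cs ['$','{'] (i : Int) none ∧
        PySem.List.pyGet? cs (PySem.Chars.findFrom cs ['$','{'] (i : Int) none - 1) = some '$' := hcond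
    rw [pvLoopA, dif_neg hj', if_pos hcond']
    rw [show ((j.toNat + 2 : Nat)) = ((PySem.Chars.findFrom cs ['$','{'] (i : Int) none).toNat + 2) from rfl] at ih
    rw [ih]
    have hle : i ≤ cs.length := by
      by_contra hc
      exact hj' (pvFindFrom_gt_len cs _ i (by omega))
    obtain ⟨hij, hpre, hmin⟩ := PySem.Chars.findFrom_natCast_spec cs ['$','{'] i hle hj'
    obtain ⟨hM1, hM2⟩ := (pvMatchAt cs j.toNat).mp hpre
    obtain ⟨hjpos, hprev⟩ := hcond'
    have hJ1 : 1 ≤ j.toNat := by omega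
    have hprev' : cs[j.toNat - 1]? = some '$' := by
      have : j - 1 = ((j.toNat - 1 : Nat) : Int) := by omega
      rwa [this, PySem.List.pyGet?_natCast] at hprev
    constructor
    · rintro ⟨k, hk, hM, hU⟩
      exact ⟨k, by omega, hM, hU⟩
    · rintro ⟨k, hk, hM, hU⟩
      refine ⟨k, ?_, hM, hU⟩
      have hkpre : ['$','{'] <+: cs.drop k := (pvMatchAt cs k).mpr hM
      have hkJ : j.toNat ≤ k := by
        by_contra hc
        exact hmin k hk (by omega) hkpre
      have hkne : k ≠ j.toNat := by
        rintro rfl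
        rcases hU with h0 | hne
        · omega
        · exact hne hprev'
      have hkne1 : k ≠ j.toNat + 1 := by
        rintro rfl
        rw [hM.1] at hM2
        simp at hM2
      omega
  | case3 i j hj hcond =>
    have hj' : ¬ PySem.Chars.findFrom cs ['$','{'] (i : Int) none = -1 := hj
    have hcond' : ¬ (0 < PySem.Chars.findFrom cs ['$','{'] (i : Int) none ∧
        PySem.List.pyGet? cs (PySem.Chars.findFrom cs ['$','{'] (i : Int) none - 1) = some '$') := hcond
    rw [pvLoopA, dif_neg hj', if_neg hcond']
    have hle : i ≤ cs.length := by
      by_contra hc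
      exact hj' (pvFindFrom_gt_len cs _ i (by omega))
    obtain ⟨hij, hpre, hmin⟩ := PySem.Chars.findFrom_natCast_spec cs ['$','{'] i hle hj'
    obtain ⟨hM1, hM2⟩ := (pvMatchAt cs j.toNat).mp hpre
    simp only [true_iff]
    refine ⟨j.toNat, by omega, ⟨hM1, hM2⟩, ?_⟩
    push Not at hcond'
    by_cases h0 : j.toNat = 0
    · exact Or.inl h0
    · right
      have hjpos : 0 < j := by omega
      have := hcond' hjpos
      intro hc
      apply this
      have heq : j - 1 = ((j.toNat - 1 : Nat) : Int) := by omega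
      rw [heq, PySem.List.pyGet?_natCast]
      exact hc

theorem pvAlt_iff (s : String) :
    has_unescaped_placeholder_py_alt s = true ↔
      ∃ k, (s.toList[k]? = some '$' ∧ s.toList[k+1]? = some '{') ∧
        (k = 0 ∨ s.toList[k-1]? ≠ some '$') := by
  unfold has_unescaped_placeholder_py_alt
  simp only [List.any_eq_true, List.mem_range, Bool.and_eq_true, beq_iff_eq,
    Bool.not_eq_eq_eq_not, Bool.not_true, Bool.and_eq_false_iff, decide_eq_false_iff_not,
    beq_eq_false_iff_ne, ne_eq, not_lt, Nat.le_zero]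
  constructor
  · rintro ⟨k, -, h⟩
    exact ⟨k, h⟩
  · rintro ⟨k, h⟩
    obtain ⟨hk, -⟩ := List.getElem?_eq_some_iff.mp h.1.1
    exact ⟨k, hk, h⟩

-- ===== VERDICT (by name: the statement is the Claim_ definition above) =====
theorem has_unescaped_placeholder_py_spec : Claim_equal_has_unescaped_placeholder_py := by
  intro s _
  unfold Spec_has_unescaped_placeholder_py
  rw [Bool.eq_iff_iff, pvAlt_iff]
  unfold has_unescaped_placeholder_py
  rw [pvLoopA_iff]
  simp
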